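-- pv_equiv track=rewrite | github.com/guell11/Lyra-Engine-Local-AI-Music-Production-Suite | app.py | get_default_llm_id
-- ===== SOURCE A (Python) =====
-- AVAILABLE_LLMS = {
--     "gaia_text_4b": {
--         "title": "Gemma 3 Gaia PT-BR 4B",
--         "model": "cnmoro/gemma3-gaia-ptbr-4b:q4_k_m",
--         "size": "2.5 GB",
--         "kind": "text",
--         "description": "Texto em PT-BR para chat, letras e briefing musical.",
--     },
--     "gaia_vision_4b": {
--         "title": "Gemma 3 Gaia PT-BR 4B Vision",
--         "model": "cnmoro/gemma3-gaia-ptbr-4b-vision:q4_k_m",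
--         "size": "2.7 GB",
--         "kind": "vision",
--         "description": "Vision para imagem + texto em PT-BR via Ollama.",
--     },
--     "qwen35_4b": {
--         "title": "Qwen 3.5 4B",
--         "model": "qwen3.5:4b",
--         "size": "3.4 GB",
--         "kind": "text",
--         "description": "Modelo leve e rapido para conversa e ideacao.",
--     },
--     "qwen35_9b": {
--         "title": "Qwen 3.5 9B",
--         "model": "qwen3.5:9b",
--         "size": "7.2 GB",
--         "kind": "text",
--         "description": "Modelo maior para respostas mais consistentes.",
--     },
-- }
--
-- DEFAULT_TEXT_LLM_ID = "gaia_text_4b"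
--
-- DEFAULT_VISION_LLM_ID = "gaia_vision_4b"
--
-- def get_default_llm_id(kind="text"):
--     preferred = DEFAULT_VISION_LLM_ID if kind == "vision" else DEFAULT_TEXT_LLM_ID
--     if preferred in AVAILABLE_LLMS and AVAILABLE_LLMS[preferred].get("kind") == kind:
--         return preferred
--
--     for model_id, model_info in AVAILABLE_LLMS.items():
--         if model_info.get("kind") == kind:
--             return model_id
--
--     return next(iter(AVAILABLE_LLMS.keys()))
-- ===== SOURCE B (Python) =====
-- # Only the (id, kind) pairs matter for this function; metadata is irrelevant.
-- # Index built once: kind -> first id of that kind (setdefault keeps the first match).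
-- _MODEL_KINDS = [
--     ("gaia_text_4b", "text"),
--     ("gaia_vision_4b", "vision"),
--     ("qwen35_4b", "text"),
--     ("qwen35_9b", "text"),
-- ]
--
-- _KIND_TO_ID = {}
-- for _id, _kind in _MODEL_KINDS:
--     _KIND_TO_ID.setdefault(_kind, _id)
--
-- _FALLBACK_ID = _MODEL_KINDS[0][0]
--
--
-- def get_default_llm_id(kind="text"):
--     return _KIND_TO_ID.get(kind, _FALLBACK_ID)
-- ===== Notes on version B (the rewrite author's own statement) =====
-- stated objective: simpler
-- what changed: Replaces the preferred-id guard branch plus a per-call linear scan over the full AVAILABLE_LLMS metadata dict with a tiny kind->first-id index precomputed once (setdefault keeps the first match) from just the (id, kind) pairs, so each call is one dict lookup with the first id as fallback.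
import Mathlib
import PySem

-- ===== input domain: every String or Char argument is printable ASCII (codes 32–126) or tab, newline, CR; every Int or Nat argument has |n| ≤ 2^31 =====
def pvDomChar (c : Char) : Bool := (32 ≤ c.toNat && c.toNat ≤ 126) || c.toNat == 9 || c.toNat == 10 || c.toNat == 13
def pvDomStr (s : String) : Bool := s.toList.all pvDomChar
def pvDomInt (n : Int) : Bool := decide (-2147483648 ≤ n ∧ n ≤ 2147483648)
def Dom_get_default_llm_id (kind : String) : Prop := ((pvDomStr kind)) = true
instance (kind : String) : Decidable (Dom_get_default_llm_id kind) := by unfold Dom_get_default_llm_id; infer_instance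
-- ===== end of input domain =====

-- B drops A's preferred-id guard and per-call scan of the metadata dict: it keeps only the
-- (id, kind) pairs and precomputes once a kind -> first-id index (setdefault), so each call
-- is a single lookup with the first id as fallback: simpler.

-- ===== PORT A =====
def AVAILABLE_LLMS : PySem.Dict String (PySem.Dict String String) :=
  PySem.Dict.ofList [ ("gaia_text_4b",
      PySem.Dict.ofList [ ("title", "Gemma 3 Gaia PT-BR 4B"),
        ("model", "cnmoro/gemma3-gaia-ptbr-4b:q4_k_m"),
        ("size", "2.5 GB"),
        ("kind", "text"),
        ("description", "Texto em PT-BR para chat, letras e briefing musical.") ]),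
    ("gaia_vision_4b",
      PySem.Dict.ofList [ ("title", "Gemma 3 Gaia PT-BR 4B Vision"),
        ("model", "cnmoro/gemma3-gaia-ptbr-4b-vision:q4_k_m"),
        ("size", "2.7 GB"),
        ("kind", "vision"),
        ("description", "Vision para imagem + texto em PT-BR via Ollama.") ]),
    ("qwen35_4b",
      PySem.Dict.ofList [ ("title", "Qwen 3.5 4B"),
        ("model", "qwen3.5:4b"),
        ("size", "3.4 GB"),
        ("kind", "text"),
        ("description", "Modelo leve e rapido para conversa e ideacao.") ]),
    ("qwen35_9b",
      PySem.Dict.ofList [ ("title", "Qwen 3.5 9B"),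
        ("model", "qwen3.5:9b"),
        ("size", "7.2 GB"),
        ("kind", "text"),
        ("description", "Modelo maior para respostas mais consistentes.") ]) ]

def DEFAULT_TEXT_LLM_ID : String := "gaia_text_4b"
def DEFAULT_VISION_LLM_ID : String := "gaia_vision_4b"

-- the 'for model_id, model_info in AVAILABLE_LLMS.items(): if … return model_id' loop
def pvScanKind (kind : String) : List (String × PySem.Dict String String) → Option String
  | [] => none
  | (model_id, model_info) :: rest =>
      if model_info.get? "kind" == some kind then some model_id else pvScanKind kind rest

def get_default_llm_id (kind : String) : String :=
  let preferred := if kind == "vision" then DEFAULT_VISION_LLM_ID else DEFAULT_TEXT_LLM_ID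
  if AVAILABLE_LLMS.contains preferred &&
     ((AVAILABLE_LLMS.get? preferred).getD PySem.Dict.empty).get? "kind" == some kind then
    preferred
  else
    match pvScanKind kind AVAILABLE_LLMS.items with
    | some model_id => model_id
    -- next(iter(AVAILABLE_LLMS.keys())): the dict is a nonempty literal, so head exists
    | none => AVAILABLE_LLMS.keys.headD ""

-- ===== PORT B =====
-- only the (id, kind) pairs; metadata is irrelevant to this function
def MODEL_KINDS : List (String × String) :=
  [ ("gaia_text_4b", "text"),
    ("gaia_vision_4b", "vision"),
    ("qwen35_4b", "text"),
    ("qwen35_9b", "text") ]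

-- the module-level 'for _id, _kind in _MODEL_KINDS: _KIND_TO_ID.setdefault(_kind, _id)'
def KIND_TO_ID : PySem.Dict String String :=
  MODEL_KINDS.foldl (fun d p => PySem.Dict.setdefault d p.2 p.1) PySem.Dict.empty

def FALLBACK_ID : String := (MODEL_KINDS.headD ("", "")).1

def get_default_llm_id_alt (kind : String) : String :=
  KIND_TO_ID.getD kind FALLBACK_ID

-- ===== PRECONDITION & SPEC =====
def Spec_get_default_llm_id (kind : String) (out : String) : Prop := out = get_default_llm_id_alt kind
instance (kind : String) (out : String) : Decidable (Spec_get_default_llm_id kind out) := by unfold Spec_get_default_llm_id; infer_instance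

-- ===== CLAIM =====
def Claim_equal_get_default_llm_id : Prop := ∀ (kind : String), Dom_get_default_llm_id kind → Spec_get_default_llm_id kind (get_default_llm_id kind)

-- ===== LEMMAS AND PROOFS =====
def pvD1 : PySem.Dict String String :=
  ⟨[ ("title", "Gemma 3 Gaia PT-BR 4B"), ("model", "cnmoro/gemma3-gaia-ptbr-4b:q4_k_m"),
     ("size", "2.5 GB"), ("kind", "text"),
     ("description", "Texto em PT-BR para chat, letras e briefing musical.") ]⟩
def pvD2 : PySem.Dict String String :=
  ⟨[ ("title", "Gemma 3 Gaia PT-BR 4B Vision"), ("model", "cnmoro/gemma3-gaia-ptbr-4b-vision:q4_k_m"),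
     ("size", "2.7 GB"), ("kind", "vision"),
     ("description", "Vision para imagem + texto em PT-BR via Ollama.") ]⟩
def pvD3 : PySem.Dict String String :=
  ⟨[ ("title", "Qwen 3.5 4B"), ("model", "qwen3.5:4b"), ("size", "3.4 GB"), ("kind", "text"),
     ("description", "Modelo leve e rapido para conversa e ideacao.") ]⟩
def pvD4 : PySem.Dict String String :=
  ⟨[ ("title", "Qwen 3.5 9B"), ("model", "qwen3.5:9b"), ("size", "7.2 GB"), ("kind", "text"),
     ("description", "Modelo maior para respostas mais consistentes.") ]⟩

theorem pvAvailEval : AVAILABLE_LLMS =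
    ⟨[("gaia_text_4b", pvD1), ("gaia_vision_4b", pvD2), ("qwen35_4b", pvD3), ("qwen35_9b", pvD4)]⟩ := by
  decide

theorem pvKindIndexEval : KIND_TO_ID = ⟨[("text", "gaia_text_4b"), ("vision", "gaia_vision_4b")]⟩ := by
  decide

theorem pvFallbackEval : FALLBACK_ID = "gaia_text_4b" := by decide

-- ===== VERDICT =====
theorem get_default_llm_id_spec : Claim_equal_get_default_llm_id := by
  intro kind _
  unfold Spec_get_default_llm_id get_default_llm_id get_default_llm_id_alt
  by_cases hv : kind = "vision"
  · subst hv; decide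
  · by_cases ht : kind = "text"
    · subst ht; decide
    · rw [pvAvailEval, pvKindIndexEval, pvFallbackEval]
      simp [DEFAULT_TEXT_LLM_ID, pvD1, pvD2, pvD3, pvD4,
        pvScanKind, PySem.Dict.get?, PySem.Dict.getD, PySem.Dict.contains,
        PySem.Dict.keys, hv, Ne.symm hv, Ne.symm ht]
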